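-- pv_equiv track=rewrite | github.com/devdattatalele/Search-algo | data/store_data.py | build_graph_from_hierarchy
-- ===== SOURCE A (Python) =====
-- def build_graph_from_hierarchy(hierarchy):
--     graph = {}
--     root_node = "Department Store"
--     graph[root_node] = []
--     for category, products in hierarchy.items():
--         graph[root_node].append(category)
--         if category not in graph:
--             graph[category] = []
--         for product_type, brands in products.items():
--             graph[category].append(product_type)
--             if product_type not in graph:
--                 graph[product_type] = []
--             for brand in brands:
--                 graph[product_type].append(brand)
--                 if brand not in graph:
--                     graph[brand] = []
--     return graph
-- ===== SOURCE B (Python) =====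
-- def build_graph_from_hierarchy(hierarchy):
--     root = "Department Store"
--     # pass 1: flatten the nested hierarchy into an ordered (parent, child) edge list
--     edges = []
--     for category, products in hierarchy.items():
--         edges.append((root, category))
--         for product_type, brands in products.items():
--             edges.append((category, product_type))
--             for brand in brands:
--                 edges.append((product_type, brand))
--     # pass 2: node order = root then first occurrence of each child (ordered dedup)
--     nodes = dict.fromkeys([root] + [child for _, child in edges])
--     # pass 3: each adjacency list is the group of the edge list by its parent
--     return {node: [child for parent, child in edges if parent == node] for node in nodes}
-- ===== Notes on version B (the rewrite author's own statement) =====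
-- stated objective: alternative
-- what changed: A builds the adjacency dict incrementally inside the nested traversal (seed key on first sight, append per visit); B never mutates a dict during traversal: it flattens the hierarchy to an edge list, computes the key order as an ordered dedup (dict.fromkeys) of root plus all children, and materialises each adjacency list in one go by filtering the edge list by parent (group-by-filter instead of incremental mutation).
import Mathlib
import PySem

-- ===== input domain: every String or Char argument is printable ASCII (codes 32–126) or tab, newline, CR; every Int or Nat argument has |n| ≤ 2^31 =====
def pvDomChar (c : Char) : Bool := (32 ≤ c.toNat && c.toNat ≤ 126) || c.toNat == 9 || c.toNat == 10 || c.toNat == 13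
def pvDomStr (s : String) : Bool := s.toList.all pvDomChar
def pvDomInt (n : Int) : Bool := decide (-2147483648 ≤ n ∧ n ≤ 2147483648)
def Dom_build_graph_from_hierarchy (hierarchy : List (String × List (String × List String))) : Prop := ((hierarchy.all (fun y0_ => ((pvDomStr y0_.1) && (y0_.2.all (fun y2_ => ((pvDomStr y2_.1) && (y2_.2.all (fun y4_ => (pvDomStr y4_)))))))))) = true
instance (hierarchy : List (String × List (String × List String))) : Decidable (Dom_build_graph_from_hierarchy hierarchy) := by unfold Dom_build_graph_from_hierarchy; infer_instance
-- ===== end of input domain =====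

-- B replaces A's incremental dict mutation inside the traversal by: flatten to an
-- ordered (parent, child) edge list, key order = ordered dedup of root plus children,
-- each adjacency list obtained by filtering the edge list by parent (objective: alternative).


-- ===== PORT A =====
-- graph[k].append(x) is ported as 'modify k [] (· ++ [x])'; the key k is always present
-- at that point in A (root is seeded, category/product_type inserted just before), so
-- the default [] is never consulted and the port is exact.
def build_graph_from_hierarchy (hierarchy : List (String × List (String × List String))) : List (String × List String) :=
  (hierarchy.foldl
    (fun g cp =>
      let category := cp.1
      let g := g.modify "Department Store" [] (· ++ [category])
      let g := if g.contains category then g else g.insert category []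
      cp.2.foldl
        (fun g pb =>
          let product_type := pb.1
          let g := g.modify category [] (· ++ [product_type])
          let g := if g.contains product_type then g else g.insert product_type []
          pb.2.foldl
            (fun g brand =>
              let g := g.modify product_type [] (· ++ [brand])
              if g.contains brand then g else g.insert brand []) g) g)
    ((PySem.Dict.empty).insert "Department Store" ([] : List String))).items

-- ===== PORT B =====
-- pass 1 of Source B: the nested append loops collecting the (parent, child) edge list
def bgfh_edges (hierarchy : List (String × List (String × List String))) : List (String × String) :=
  hierarchy.foldl
    (fun es cp =>
      cp.2.foldl
        (fun es pb =>
          pb.2.foldl (fun es b => es ++ [(pb.1, b)])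
            (es ++ [(cp.1, pb.1)]))
        (es ++ [("Department Store", cp.1)]))
    []

-- passes 2 and 3 of Source B: dict.fromkeys = PySem.List.dedup; the result dict is built
-- by the comprehension over the deduplicated node list, grouping edges by parent.
def build_graph_from_hierarchy_alt (hierarchy : List (String × List (String × List String))) : List (String × List String) :=
  let edges := bgfh_edges hierarchy
  let nodes := PySem.List.dedup ("Department Store" :: edges.map (fun e => e.2))
  nodes.map (fun k => (k, (edges.filter (fun e => e.1 == k)).map (fun e => e.2)))

-- ===== PRECONDITION & SPEC =====
def Spec_build_graph_from_hierarchy (hierarchy : List (String × List (String × List String))) (out : List (String × List String)) : Prop := out = build_graph_from_hierarchy_alt hierarchy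
instance (hierarchy : List (String × List (String × List String))) (out : List (String × List String)) : Decidable (Spec_build_graph_from_hierarchy hierarchy out) := by unfold Spec_build_graph_from_hierarchy; infer_instance

-- ===== CLAIM (what is proved, stated in full; the proofs are below) =====
def Claim_equal_build_graph_from_hierarchy : Prop := ∀ (hierarchy : List (String × List (String × List String))), Dom_build_graph_from_hierarchy hierarchy → Spec_build_graph_from_hierarchy hierarchy (build_graph_from_hierarchy hierarchy)

-- ===== LEMMAS AND PROOFS =====

-- the flatMap normal form of the edge list
def bgfh_edgesF (hierarchy : List (String × List (String × List String))) : List (String × String) :=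
  hierarchy.flatMap (fun cp =>
    ("Department Store", cp.1) ::
      cp.2.flatMap (fun pb =>
        (cp.1, pb.1) :: pb.2.map (fun brand => (pb.1, brand))))

theorem bgfh_edges_brands (pt : String) (bs : List String) (es : List (String × String)) :
    bs.foldl (fun es b => es ++ [(pt, b)]) es = es ++ bs.map (fun b => (pt, b)) := by
  induction bs generalizing es with
  | nil => simp
  | cons b bs ih => simp [ih]

theorem bgfh_edges_products (c : String) (ps : List (String × List String)) (es : List (String × String)) :
    ps.foldl
      (fun es pb =>
        pb.2.foldl (fun es b => es ++ [(pb.1, b)]) (es ++ [(c, pb.1)])) es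
    = es ++ ps.flatMap (fun pb => (c, pb.1) :: pb.2.map (fun b => (pb.1, b))) := by
  induction ps generalizing es with
  | nil => simp
  | cons pb ps ih =>
      rw [List.foldl_cons, bgfh_edges_brands, ih, List.flatMap_cons]
      simp

theorem bgfh_edges_aux (h : List (String × List (String × List String))) (es : List (String × String)) :
    h.foldl
      (fun es cp =>
        cp.2.foldl
          (fun es pb =>
            pb.2.foldl (fun es b => es ++ [(pb.1, b)])
              (es ++ [(cp.1, pb.1)]))
          (es ++ [("Department Store", cp.1)])) es
    = es ++ bgfh_edgesF h := by
  induction h generalizing es with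
  | nil => simp [bgfh_edgesF]
  | cons cp t ih =>
      rw [List.foldl_cons, bgfh_edges_products, ih]
      simp [bgfh_edgesF]

theorem bgfh_edges_eq (h : List (String × List (String × List String))) :
    bgfh_edges h = bgfh_edgesF h := by
  rw [bgfh_edges, bgfh_edges_aux]
  simp

-- A's per-edge action on the dict
def bgfh_step (g : PySem.Dict String (List String)) (e : String × String) : PySem.Dict String (List String) :=
  (g.modify e.1 [] (· ++ [e.2])).setdefault e.2 []

-- B's setdefault is exactly A's 'if not in graph then insert []'
theorem bgfh_step_eq (g : PySem.Dict String (List String)) (p c : String) :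
    bgfh_step g (p, c) =
      (let g := g.modify p [] (· ++ [c]);
       if g.contains c then g else g.insert c []) := by
  unfold bgfh_step
  by_cases h : ((g.modify p [] (· ++ [c])).contains c) = true
  · simp [PySem.Dict.setdefault_of_contains _ _ h, h]
  · simp only [Bool.not_eq_true] at h
    simp [PySem.Dict.setdefault_of_not_contains _ _ h, h]

theorem bgfh_brands (pt : String) (bs : List String) (g : PySem.Dict String (List String)) :
    bs.foldl
      (fun g brand =>
        let g := g.modify pt [] (· ++ [brand])
        if g.contains brand then g else g.insert brand []) g
    = (bs.map (fun brand => (pt, brand))).foldl bgfh_step g := by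
  induction bs generalizing g with
  | nil => rfl
  | cons b bs ih => simp only [List.map_cons, List.foldl_cons, bgfh_step_eq, ih]

theorem bgfh_products (c : String) (ps : List (String × List String)) (g : PySem.Dict String (List String)) :
    ps.foldl
      (fun g pb =>
        let product_type := pb.1
        let g := g.modify c [] (· ++ [product_type])
        let g := if g.contains product_type then g else g.insert product_type []
        pb.2.foldl
          (fun g brand =>
            let g := g.modify product_type [] (· ++ [brand])
            if g.contains brand then g else g.insert brand []) g) g
    = (ps.flatMap (fun pb => (c, pb.1) :: pb.2.map (fun brand => (pb.1, brand)))).foldl bgfh_step g := by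
  induction ps generalizing g with
  | nil => rfl
  | cons pb ps ih =>
      rw [List.flatMap_cons, List.foldl_cons, List.foldl_append, ← ih]
      congr 1
      simp [List.foldl_cons, bgfh_step_eq, bgfh_brands]

theorem bgfh_main (h : List (String × List (String × List String))) (g : PySem.Dict String (List String)) :
    h.foldl
      (fun g cp =>
        let category := cp.1
        let g := g.modify "Department Store" [] (· ++ [category])
        let g := if g.contains category then g else g.insert category []
        cp.2.foldl
          (fun g pb =>
            let product_type := pb.1
            let g := g.modify category [] (· ++ [product_type])
            let g := if g.contains product_type then g else g.insert product_type []
            pb.2.foldl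
              (fun g brand =>
                let g := g.modify product_type [] (· ++ [brand])
                if g.contains brand then g else g.insert brand []) g) g) g
    = (bgfh_edgesF h).foldl bgfh_step g := by
  induction h generalizing g with
  | nil => rfl
  | cons cp t ih =>
      rw [bgfh_edgesF, List.flatMap_cons, List.foldl_cons, List.foldl_append]
      rw [show (List.flatMap (fun cp => ("Department Store", cp.1) :: List.flatMap (fun pb => (cp.1, pb.1) :: List.map (fun brand => (pb.1, brand)) pb.2) cp.2) t) = bgfh_edgesF t from rfl, ← ih]
      congr 1
      simp [List.foldl_cons, bgfh_step_eq, bgfh_products]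

-- values: one bgfh_step fold appends, per key, exactly the children of that key's edges
theorem bgfh_getD_setdefault (g : PySem.Dict String (List String)) (c k : String) :
    (g.setdefault c []).getD k [] = g.getD k [] := by
  by_cases h : g.contains c = true
  · rw [PySem.Dict.setdefault_of_contains _ _ h]
  · simp only [Bool.not_eq_true] at h
    rw [PySem.Dict.setdefault_of_not_contains _ _ h, PySem.Dict.getD_insert]
    split_ifs with hk
    · subst hk; exact (PySem.Dict.getD_of_not_contains _ _ h).symm
    · rfl

theorem bgfh_getD_fold (es : List (String × String)) (g : PySem.Dict String (List String)) (k : String) :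
    (es.foldl bgfh_step g).getD k [] = g.getD k [] ++ (es.filter (fun e => e.1 == k)).map (fun e => e.2) := by
  induction es generalizing g with
  | nil => simp
  | cons e t ih =>
      rw [List.foldl_cons, ih]
      have hstep : (bgfh_step g e).getD k [] =
          if k = e.1 then g.getD e.1 [] ++ [e.2] else g.getD k [] := by
        unfold bgfh_step
        rw [bgfh_getD_setdefault, PySem.Dict.getD_modify]
      rw [hstep, List.filter_cons]
      by_cases hk : e.1 = k
      · subst hk
        simp
      · have hk' : ¬ (k = e.1) := fun h' => hk h'.symm
        simp [hk, hk']

-- parent-closure: every edge's parent is already a known node when the edge is processed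
def bgfh_OkFrom : List String → List (String × String) → Prop
  | _, [] => True
  | ks, e :: t => e.1 ∈ ks ∧ bgfh_OkFrom (e.2 :: ks) t

theorem bgfh_okfrom_mono (es : List (String × String)) (ks ks' : List String)
    (hsub : ∀ x ∈ ks, x ∈ ks') (h : bgfh_OkFrom ks es) : bgfh_OkFrom ks' es := by
  induction es generalizing ks ks' with
  | nil => trivial
  | cons e t ih =>
      obtain ⟨h1, h2⟩ := h
      exact ⟨hsub _ h1, ih (e.2 :: ks) (e.2 :: ks')
        (by intro x hx; rcases List.mem_cons.1 hx with h | h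
            · exact List.mem_cons.2 (Or.inl h)
            · exact List.mem_cons.2 (Or.inr (hsub _ h))) h2⟩

theorem bgfh_okfrom_append (xs ys : List (String × String)) (ks : List String)
    (h1 : bgfh_OkFrom ks xs) (h2 : bgfh_OkFrom (xs.map (fun e => e.2) ++ ks) ys) :
    bgfh_OkFrom ks (xs ++ ys) := by
  induction xs generalizing ks with
  | nil => simpa using h2
  | cons x xs ih =>
      obtain ⟨hx, hxs⟩ := h1
      refine ⟨hx, ih (x.2 :: ks) hxs ?_⟩
      refine bgfh_okfrom_mono ys _ _ ?_ h2
      intro y hy; simp only [List.map_cons, List.cons_append, List.mem_cons, List.mem_append] at hy ⊢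
      tauto

theorem bgfh_okfrom_brands (bs : List String) (ks : List String) (pt : String) (hpt : pt ∈ ks) :
    bgfh_OkFrom ks (bs.map (fun b => (pt, b))) := by
  induction bs generalizing ks with
  | nil => trivial
  | cons b bs ih => exact ⟨hpt, ih _ (List.mem_cons_of_mem _ hpt)⟩

theorem bgfh_okfrom_products (ps : List (String × List String)) (ks : List String) (c : String) (hc : c ∈ ks) :
    bgfh_OkFrom ks (ps.flatMap (fun pb => (c, pb.1) :: pb.2.map (fun b => (pb.1, b)))) := by
  induction ps generalizing ks with
  | nil => trivial
  | cons pb ps ih =>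
      rw [List.flatMap_cons]
      refine bgfh_okfrom_append _ _ _
        ⟨hc, bgfh_okfrom_brands pb.2 _ pb.1 (List.mem_cons_self)⟩
        (ih _ ?_)
      exact List.mem_append_right _ hc

theorem bgfh_okfrom_edges (h : List (String × List (String × List String))) (ks : List String)
    (hroot : "Department Store" ∈ ks) : bgfh_OkFrom ks (bgfh_edgesF h) := by
  induction h generalizing ks with
  | nil => trivial
  | cons cp t ih =>
      rw [bgfh_edgesF, List.flatMap_cons]
      refine bgfh_okfrom_append _ _ _
        ⟨hroot, bgfh_okfrom_products cp.2 _ cp.1 (List.mem_cons_self)⟩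
        (ih _ ?_)
      exact List.mem_append_right _ hroot

-- keys of the fold = the ordered-dedup fold over the children, given parent-closure
theorem bgfh_keys_fold (es : List (String × String)) (g : PySem.Dict String (List String))
    (hok : bgfh_OkFrom g.keys es) :
    (es.foldl bgfh_step g).keys = es.foldl (fun ks e => PySem.Set.add ks e.2) g.keys := by
  induction es generalizing g with
  | nil => rfl
  | cons e t ih =>
      obtain ⟨hp, hok'⟩ := hok
      have hmod : (g.modify e.1 [] (· ++ [e.2])).keys = g.keys := by
        rw [PySem.Dict.keys_modify,
            PySem.Dict.keys_insert_of_contains _ _ ((PySem.Dict.contains_iff_mem_keys g e.1).2 hp)]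
      have hcontains : (g.modify e.1 [] (· ++ [e.2])).contains e.2 = g.keys.contains e.2 := by
        by_cases hm : e.2 ∈ g.keys
        · rw [(PySem.Dict.contains_iff_mem_keys _ e.2).2 (by rw [hmod]; exact hm),
              List.contains_iff_mem.2 hm]
        · have h1 : (g.modify e.1 [] (· ++ [e.2])).contains e.2 = false := by
            cases hcb : (g.modify e.1 [] (· ++ [e.2])).contains e.2 with
            | false => rfl
            | true =>
                exact absurd (by rw [← hmod]; exact (PySem.Dict.contains_iff_mem_keys _ e.2).1 hcb) hm
          have h2 : g.keys.contains e.2 = false := by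
            cases hcc : g.keys.contains e.2 with
            | false => rfl
            | true => exact absurd (List.contains_iff_mem.1 hcc) hm
          rw [h1, h2]
      rw [List.foldl_cons, List.foldl_cons, ih]
      · congr 1
        unfold bgfh_step
        by_cases hc : g.keys.contains e.2 = true
        · rw [PySem.Dict.setdefault_of_contains _ _ (by rw [hcontains]; exact hc), hmod]
          show _ = if g.keys.contains e.2 = true then _ else _
          rw [if_pos hc]
        · simp only [Bool.not_eq_true] at hc
          rw [PySem.Dict.setdefault_of_not_contains _ _ (by rw [hcontains]; exact hc),
              PySem.Dict.keys_insert_of_not_contains _ _ (by rw [hcontains]; exact hc), hmod]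
          show _ = if g.keys.contains e.2 = true then _ else _
          rw [hc]
          simp
      · -- bgfh_OkFrom (bgfh_step g e).keys t
        unfold bgfh_step
        by_cases hc : g.keys.contains e.2 = true
        · rw [PySem.Dict.setdefault_of_contains _ _ (by rw [hcontains]; exact hc), hmod]
          refine bgfh_okfrom_mono t _ _ ?_ hok'
          intro x hx
          rcases List.mem_cons.1 hx with h | h
          · exact h ▸ List.contains_iff_mem.1 hc
          · exact h
        · simp only [Bool.not_eq_true] at hc
          rw [PySem.Dict.setdefault_of_not_contains _ _ (by rw [hcontains]; exact hc),
              PySem.Dict.keys_insert_of_not_contains _ _ (by rw [hcontains]; exact hc), hmod]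
          refine bgfh_okfrom_mono t _ _ ?_ hok'
          intro x hx
          rcases List.mem_cons.1 hx with h | h
          · exact List.mem_append_right _ (h ▸ List.mem_singleton.2 rfl)
          · exact List.mem_append_left _ h

theorem bgfh_nodup_fold (es : List (String × String)) (g : PySem.Dict String (List String))
    (hnd : g.keys.Nodup) : (es.foldl bgfh_step g).keys.Nodup := by
  induction es generalizing g with
  | nil => exact hnd
  | cons e t ih =>
      refine ih _ ?_
      unfold bgfh_step
      have h1 : (g.modify e.1 [] (· ++ [e.2])).keys.Nodup := by
        rw [PySem.Dict.keys_modify]; exact PySem.Dict.nodup_keys_insert _ _ _ hnd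
      by_cases hc : (g.modify e.1 [] (· ++ [e.2])).contains e.2 = true
      · rw [PySem.Dict.setdefault_of_contains _ _ hc]; exact h1
      · simp only [Bool.not_eq_true] at hc
        rw [PySem.Dict.setdefault_of_not_contains _ _ hc]
        exact PySem.Dict.nodup_keys_insert _ _ _ h1

-- ===== VERDICT (by name: the statement is the Claim_ definition above) =====
theorem build_graph_from_hierarchy_spec : Claim_equal_build_graph_from_hierarchy := by
  intro h _
  unfold Spec_build_graph_from_hierarchy build_graph_from_hierarchy
  rw [show build_graph_from_hierarchy_alt h
        = (PySem.List.dedup ("Department Store" :: (bgfh_edges h).map (fun e => e.2))).map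
            (fun k => (k, ((bgfh_edges h).filter (fun e => e.1 == k)).map (fun e => e.2))) from rfl]
  rw [bgfh_main, bgfh_edges_eq]
  set init : PySem.Dict String (List String) := (PySem.Dict.empty).insert "Department Store" ([] : List String) with hinit
  have hkeys : init.keys = ["Department Store"] := rfl
  have hnd : init.keys.Nodup := by rw [hkeys]; simp
  have hfin := bgfh_nodup_fold (bgfh_edgesF h) init hnd
  rw [PySem.Dict.items_eq_map_keys _ hfin ([] : List String)]
  rw [bgfh_keys_fold (bgfh_edgesF h) init (bgfh_okfrom_edges h _ (by rw [hkeys]; exact List.mem_singleton.2 rfl))]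
  have hdedup : PySem.List.dedup ("Department Store" :: (bgfh_edgesF h).map (fun e => e.2))
      = (bgfh_edgesF h).foldl (fun ks e => PySem.Set.add ks e.2) init.keys := by
    rw [hkeys]
    show PySem.Set.ofList ("Department Store" :: (bgfh_edgesF h).map (fun e => e.2)) = _
    rw [show ("Department Store" :: (bgfh_edgesF h).map (fun e => e.2))
          = ["Department Store"] ++ (bgfh_edgesF h).map (fun e => e.2) from rfl,
        PySem.Set.ofList_append, PySem.Set.update_map_eq_foldl_add]
    rfl
  rw [hdedup]
  refine List.map_congr_left ?_
  intro k _
  rw [bgfh_getD_fold]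
  have : init.getD k [] = [] := by
    rw [hinit, PySem.Dict.getD_insert]
    split_ifs <;> rfl
  rw [this, List.nil_append]
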